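-- pv_equiv track=rewrite | github.com/Aditya-Agrawal-07/COL100-Assignments | 2021AM10198_ASSIGNMENT7/2021AM10198-q2.py | sortings
-- ===== SOURCE A (Python) =====
-- def sortings(inpt : str) -> str:
--     A=[]
--     for k in inpt:
--         A.append(k)
--     B=[]
--     C=[]
--     D=[]
--     X=""
--     for i in A:
--         if i=="1" or i=="2" or i=="3" or i=="4" or i=="5" or i=="6" or i=="7" or i=="8" or i=="9" or i=="0":
--             c=0
--             for j in range(0,len(A)):
--                 if i==A[j]:
--                     c+=1
--             if c%2!=0:
--                 B.append(int(i))
--             else: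
--                 C.append(i)
--         else:
--             C.append(i)
--     B.sort()
--     for n in B:
--         D.append(str(n))
--     D.extend(C)
--     for m in D:
--         X+=m
--     return X
-- ===== SOURCE B (Python) =====
-- def sortings(inpt : str) -> str:
--     cnt = {}
--     for ch in inpt:
--         cnt[ch] = cnt.get(ch, 0) + 1
--     odd = ""
--     for d in "0123456789":
--         c = cnt.get(d, 0)
--         if c % 2 == 1:
--             odd += d * c
--     rest = "".join(ch for ch in inpt if not ('0' <= ch <= '9') or cnt.get(ch, 0) % 2 == 0)
--     return odd + rest
-- ===== Notes on version B (the rewrite author's own statement) =====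
-- stated objective: alternative
-- what changed: A recounts each character with an inner index scan (quadratic in the number of digit occurrences) and comparison-sorts the odd-count digits; B builds one frequency dict in a single pass and emits the sorted odd-digit portion by counting sort over the ten digit characters in increasing order, plus one filtered pass for the remainder.
import Mathlib
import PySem

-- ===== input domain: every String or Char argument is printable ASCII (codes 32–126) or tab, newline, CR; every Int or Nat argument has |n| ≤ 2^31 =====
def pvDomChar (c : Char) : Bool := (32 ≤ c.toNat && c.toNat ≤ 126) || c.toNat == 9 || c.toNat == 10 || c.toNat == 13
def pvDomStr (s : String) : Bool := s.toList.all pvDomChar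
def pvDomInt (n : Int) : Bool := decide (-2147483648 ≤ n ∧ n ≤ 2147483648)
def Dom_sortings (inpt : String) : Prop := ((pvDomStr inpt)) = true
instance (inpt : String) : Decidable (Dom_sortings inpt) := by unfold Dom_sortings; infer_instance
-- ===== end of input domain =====

-- B replaces A's per-character re-count (inner index loop) and comparison sort by a
-- single frequency pass plus counting-sort emission of the odd-count digits.

-- ===== PORT A =====
-- literal transliteration of Source A: per character, recount its occurrences with an
-- inner index loop; odd-count digits go to B (as ints), the rest to C in order;
-- B is sorted, stringified and concatenated with C.
def sortings (inpt : String) : String :=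
  let A : List Char := inpt.toList.foldl (fun acc k => acc ++ [k]) []
  let BC : List Int × List Char := A.foldl (fun (st : List Int × List Char) i =>
    if i = '1' ∨ i = '2' ∨ i = '3' ∨ i = '4' ∨ i = '5' ∨ i = '6' ∨ i = '7' ∨ i = '8' ∨ i = '9' ∨ i = '0' then
      -- c = occurrences of i in A, counted by the index loop; A[j] is always in range here
      let c : Int := (PySem.List.pyRange 0 (PySem.List.len A) 1).foldl
        (fun c j => if i = PySem.List.pyGetD A j ' ' then c + 1 else c) 0
      if PySem.Int.mod c 2 ≠ 0 then
        -- int(i): i is a digit character in this branch, so ofStr? succeeds; 0 is an unreachable default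
        (st.1 ++ [(PySem.Int.ofStr? (String.ofList [i])).getD 0], st.2)
      else (st.1, st.2 ++ [i])
    else (st.1, st.2 ++ [i])) ([], [])
  let Bs : List Int := PySem.List.sorted BC.1 (fun x => x) false
  let D : List String := Bs.foldl (fun acc n => acc ++ [PySem.Int.toStr n]) []
  -- D.extend(C): each Python character is a one-character string
  let D2 : List String := D ++ BC.2.map (fun c => String.ofList [c])
  D2.foldl (fun X m => X ++ m) ""

-- ===== PORT B =====
-- literal transliteration of Source B: one frequency dict over the input
-- (cnt[ch] = cnt.get(ch, 0) + 1 is Dict.modify), counting-sort emission of the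
-- odd-count digits in increasing digit order, then one filtered pass for the remainder.
def sortings_alt (inpt : String) : String :=
  let cnt : PySem.Dict Char Int :=
    inpt.toList.foldl (fun (d : PySem.Dict Char Int) ch => d.modify ch 0 (· + 1)) PySem.Dict.empty
  let odd : String := ("0123456789".toList).foldl (fun acc d =>
      let c := cnt.getD d 0
      if PySem.Int.mod c 2 = 1 then acc ++ String.ofList (List.replicate c.toNat d) else acc) ""
  let rest : String := String.ofList (inpt.toList.filter
      (fun ch => !(decide ('0' ≤ ch ∧ ch ≤ '9')) || (PySem.Int.mod (cnt.getD ch 0) 2 == 0)))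
  odd ++ rest

-- ===== PRECONDITION & SPEC =====
def Spec_sortings (inpt : String) (out : String) : Prop := out = sortings_alt inpt
instance (inpt : String) (out : String) : Decidable (Spec_sortings inpt out) := by unfold Spec_sortings; infer_instance

-- ===== CLAIM (what is proved, stated in full; the proofs are below) =====
def Claim_equal_sortings : Prop := ∀ (inpt : String), Dom_sortings inpt → Spec_sortings inpt (sortings inpt)

-- ===== LEMMAS AND PROOFS =====

-- the odd-count-digit test and int(·) on a digit character
def pvOddD (L : List Char) (c : Char) : Bool :=
  (decide ('0' ≤ c ∧ c ≤ '9')) && (L.count c) % 2 == 1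

def pvToI (i : Char) : Int := (PySem.Int.ofStr? (String.ofList [i])).getD 0

-- the canonical result of sorting the odd-count digits: blocks in increasing digit order
def pvJ (L : List Char) : List Char :=
  ['0','1','2','3','4','5','6','7','8','9'].flatMap
    (fun d => if pvOddD L d then List.replicate (L.count d) d else [])

theorem pv_digit_cases {c : Char} (h : '0' ≤ c ∧ c ≤ '9') :
    c = '0' ∨ c = '1' ∨ c = '2' ∨ c = '3' ∨ c = '4' ∨ c = '5' ∨ c = '6' ∨ c = '7' ∨ c = '8' ∨ c = '9' := by
  obtain ⟨h1, h2⟩ := h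
  have a1 : 48 ≤ c.toNat := h1
  have a2 : c.toNat ≤ 57 := h2
  have conv : ∀ (d : Char), c.toNat = d.toNat → c = d := fun d hd =>
    Char.ofNat_toNat c ▸ Char.ofNat_toNat d ▸ congrArg Char.ofNat hd
  have : c.toNat = 48 ∨ c.toNat = 49 ∨ c.toNat = 50 ∨ c.toNat = 51 ∨ c.toNat = 52 ∨ c.toNat = 53 ∨ c.toNat = 54 ∨ c.toNat = 55 ∨ c.toNat = 56 ∨ c.toNat = 57 := by omega
  rcases this with h|h|h|h|h|h|h|h|h|h
  · exact Or.inl (conv '0' (h.trans (by decide)))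
  · exact Or.inr (Or.inl (conv '1' (h.trans (by decide))))
  · exact Or.inr (Or.inr (Or.inl (conv '2' (h.trans (by decide)))))
  · exact Or.inr (Or.inr (Or.inr (Or.inl (conv '3' (h.trans (by decide))))))
  · exact Or.inr (Or.inr (Or.inr (Or.inr (Or.inl (conv '4' (h.trans (by decide)))))))
  · exact Or.inr (Or.inr (Or.inr (Or.inr (Or.inr (Or.inl (conv '5' (h.trans (by decide))))))))
  · exact Or.inr (Or.inr (Or.inr (Or.inr (Or.inr (Or.inr (Or.inl (conv '6' (h.trans (by decide)))))))))
  · exact Or.inr (Or.inr (Or.inr (Or.inr (Or.inr (Or.inr (Or.inr (Or.inl (conv '7' (h.trans (by decide))))))))))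
  · exact Or.inr (Or.inr (Or.inr (Or.inr (Or.inr (Or.inr (Or.inr (Or.inr (Or.inl (conv '8' (h.trans (by decide)))))))))))
  · exact Or.inr (Or.inr (Or.inr (Or.inr (Or.inr (Or.inr (Or.inr (Or.inr (Or.inr (conv '9' (h.trans (by decide)))))))))))

theorem pv_orchain_iff (c : Char) :
    (c = '1' ∨ c = '2' ∨ c = '3' ∨ c = '4' ∨ c = '5' ∨ c = '6' ∨ c = '7' ∨ c = '8' ∨ c = '9' ∨ c = '0')
      ↔ ('0' ≤ c ∧ c ≤ '9') := by
  constructor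
  · rintro (rfl|rfl|rfl|rfl|rfl|rfl|rfl|rfl|rfl|rfl) <;> exact ⟨by decide, by decide⟩
  · intro h
    rcases pv_digit_cases h with rfl|rfl|rfl|rfl|rfl|rfl|rfl|rfl|rfl|rfl <;> tauto

theorem pv_count_fold (i : Char) (L : List Char) (a : Int) :
    L.foldl (fun acc x => if i = x then acc + 1 else acc) a = a + (L.count i : Int) := by
  induction L generalizing a with
  | nil => simp
  | cons x xs ih =>
    by_cases h : i = x
    · subst h; simp [ih]; ring
    · simp [h, ih, Ne.symm h]

theorem pv_count (L : List Char) (i : Char) :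
    ((PySem.List.pyRange 0 (PySem.List.len L) 1).foldl
        (fun c j => if i = PySem.List.pyGetD L j ' ' then c + 1 else c) 0)
      = (L.count i : Int) := by
  rw [PySem.List.foldl_pyRange_zero_pyGetD L ' ' (fun acc x => if i = x then acc + 1 else acc) 0]
  rw [pv_count_fold]; simp

theorem pv_mod_iff (n : Nat) : (PySem.Int.mod (n : Int) 2 ≠ 0) ↔ (n % 2 == 1) := by
  rw [show (2:Int) = ((2:Nat):Int) by norm_num, PySem.Int.mod_natCast]
  rcases Nat.mod_two_eq_zero_or_one n with h | h <;> rw [h] <;> simp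

theorem pv_modb (n : Nat) : (PySem.Int.mod (n:Int) 2 == (0:Int)) = !(n % 2 == 1) := by
  rw [show (2:Int) = ((2:Nat):Int) by norm_num, PySem.Int.mod_natCast]
  rcases Nat.mod_two_eq_zero_or_one n with h | h <;> rw [h] <;> simp

theorem pv_mod1 (n : Nat) : (PySem.Int.mod (n:Int) 2 = 1) ↔ (n % 2 == 1) := by
  rw [show (2:Int) = ((2:Nat):Int) by norm_num, PySem.Int.mod_natCast]
  rcases Nat.mod_two_eq_zero_or_one n with h | h <;> rw [h] <;> simp

-- A's main loop computes a filter-map (odd-count digits, as ints) and a filter (the rest)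
theorem pv_A_loop (L : List Char) :
    (L.foldl (fun (st : List Int × List Char) i =>
      if i = '1' ∨ i = '2' ∨ i = '3' ∨ i = '4' ∨ i = '5' ∨ i = '6' ∨ i = '7' ∨ i = '8' ∨ i = '9' ∨ i = '0' then
        if PySem.Int.mod ((PySem.List.pyRange 0 (PySem.List.len L) 1).foldl
            (fun c j => if i = PySem.List.pyGetD L j ' ' then c + 1 else c) 0) 2 ≠ 0 then
          (st.1 ++ [(PySem.Int.ofStr? (String.ofList [i])).getD 0], st.2)
        else (st.1, st.2 ++ [i])
      else (st.1, st.2 ++ [i])) ([], []))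
    = ((L.filter (pvOddD L)).map pvToI, L.filter (fun c => !pvOddD L c)) := by
  have hstep : (fun (st : List Int × List Char) i =>
      if i = '1' ∨ i = '2' ∨ i = '3' ∨ i = '4' ∨ i = '5' ∨ i = '6' ∨ i = '7' ∨ i = '8' ∨ i = '9' ∨ i = '0' then
        if PySem.Int.mod ((PySem.List.pyRange 0 (PySem.List.len L) 1).foldl
            (fun c j => if i = PySem.List.pyGetD L j ' ' then c + 1 else c) 0) 2 ≠ 0 then
          (st.1 ++ [(PySem.Int.ofStr? (String.ofList [i])).getD 0], st.2)
        else (st.1, st.2 ++ [i])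
      else (st.1, st.2 ++ [i]))
      = (fun (st : List Int × List Char) i =>
        ((fun s1 x => if pvOddD L x then s1 ++ [pvToI x] else s1) st.1 i,
         (fun s2 x => if !pvOddD L x then s2 ++ [x] else s2) st.2 i)) := by
    funext st i
    simp only []
    by_cases hd : '0' ≤ i ∧ i ≤ '9'
    · rw [if_pos ((pv_orchain_iff i).mpr hd), pv_count]
      by_cases ho : (L.count i) % 2 == 1
      · rw [if_pos ((pv_mod_iff _).mpr ho)]
        simp [pvOddD, pvToI, hd, ho]
      · rw [if_neg (fun hh => ho ((pv_mod_iff _).mp hh))]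
        simp [pvOddD, hd, ho]
    · rw [if_neg (fun hh => hd ((pv_orchain_iff i).mp hh))]
      simp [pvOddD, hd]
  rw [hstep, PySem.List.foldl_prod_mk (f := fun s1 x => if pvOddD L x then s1 ++ [pvToI x] else s1)
    (g := fun s2 x => if !pvOddD L x then s2 ++ [x] else s2)]
  rw [PySem.List.foldl_append_if (pvOddD L) pvToI]
  rw [PySem.List.foldl_append_if_eq_filter (fun c => !pvOddD L c)]
  simp

theorem pv_count_flat (ds : List Char) (L : List Char) (a : Char) (hnd : ds.Nodup) :
    (ds.flatMap (fun d => if pvOddD L d then List.replicate (L.count d) d else [])).count a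
    = if a ∈ ds ∧ pvOddD L a then L.count a else 0 := by
  induction ds with
  | nil => simp
  | cons d ds ih =>
    rw [List.flatMap_cons, List.count_append, ih hnd.of_cons]
    by_cases had : a = d
    · subst had
      have hnm : a ∉ ds := (List.nodup_cons.mp hnd).1
      by_cases ho : pvOddD L a <;> simp [ho, hnm]
    · by_cases ho : pvOddD L d <;>
        simp [ho, had, List.count_replicate, Ne.symm had]

theorem pv_mem_digits {L : List Char} {a : Char} (h : pvOddD L a = true) :
    a ∈ ['0','1','2','3','4','5','6','7','8','9'] := by
  have hd : '0' ≤ a ∧ a ≤ '9' := by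
    have := (Bool.and_eq_true _ _).mp h |>.1; exact of_decide_eq_true this
  rcases pv_digit_cases hd with rfl|rfl|rfl|rfl|rfl|rfl|rfl|rfl|rfl|rfl <;> decide

theorem pv_perm (L : List Char) : (pvJ L).Perm (L.filter (pvOddD L)) := by
  rw [List.perm_iff_count]
  intro a
  rw [pvJ, pv_count_flat _ _ _ (by decide)]
  by_cases ho : pvOddD L a
  · rw [List.count_filter (by simpa using ho)]
    simp [ho, pv_mem_digits ho]
  · simp [ho]
    exact (List.count_eq_zero.mpr (fun hm => ho (List.of_mem_filter hm))).symm

theorem pv_pairwise_flat (ds : List Char) (L : List Char)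
    (hds : ds.Pairwise (fun a b => pvToI a ≤ pvToI b)) :
    (ds.flatMap (fun d => if pvOddD L d then List.replicate (L.count d) d else [])).Pairwise
      (fun a b => pvToI a ≤ pvToI b) := by
  induction ds with
  | nil => simp
  | cons d ds ih =>
    rw [List.flatMap_cons]
    apply List.pairwise_append.mpr
    refine ⟨?_, ih hds.of_cons, ?_⟩
    · by_cases ho : pvOddD L d <;> simp [ho, List.pairwise_replicate]
    · intro x hx y hy
      have hxd : x = d := by
        by_cases ho : pvOddD L d
        · simp [ho] at hx; exact hx.2
        · simp [ho] at hx
      obtain ⟨d', hd', hyd⟩ := List.mem_flatMap.mp hy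
      have hyd2 : y = d' := by
        by_cases ho : pvOddD L d'
        · simp [ho] at hyd; exact hyd.2
        · simp [ho] at hyd
      subst hxd; subst hyd2
      exact (List.pairwise_cons.mp hds).1 _ hd'

-- counting-sort correctness: sorting the odd-count digits gives the canonical blocks
theorem pv_sorted_eq (L : List Char) :
    PySem.List.sorted ((L.filter (pvOddD L)).map pvToI) (fun x => x) false
      = (pvJ L).map pvToI := by
  apply PySem.List.sorted_id_eq_of_perm_of_pairwise
  · exact (pv_perm L).map pvToI
  · exact (List.pairwise_map).mpr (pv_pairwise_flat _ _ (by decide))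

theorem pv_toStr_toI {d : Char} (h : '0' ≤ d ∧ d ≤ '9') :
    (PySem.Int.toStr (pvToI d)).toList = [d] := by
  rcases pv_digit_cases h with rfl|rfl|rfl|rfl|rfl|rfl|rfl|rfl|rfl|rfl <;> decide

theorem pv_mem_J_digit {L : List Char} {x : Char} (h : x ∈ pvJ L) : '0' ≤ x ∧ x ≤ '9' := by
  obtain ⟨d, hd, hx⟩ := List.mem_flatMap.mp h
  have : x = d := by
    by_cases ho : pvOddD L d
    · simp [ho] at hx; exact hx.2
    · simp [ho] at hx
  subst this
  fin_cases hd <;> exact ⟨by decide, by decide⟩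

theorem pv_foldl_str (l : List String) (s : String) :
    (l.foldl (fun X m => X ++ m) s).toList = s.toList ++ (l.map String.toList).flatten := by
  induction l generalizing s with
  | nil => simp
  | cons x xs ih => simp [List.foldl_cons, ih]

theorem pv_flatten_singleton {α : Type} (l : List α) : (l.map (fun x => [x])).flatten = l := by
  induction l with
  | nil => rfl
  | cons x xs ih => simp [ih]

theorem pv_A_toList (inpt : String) :
    (sortings inpt).toList = pvJ inpt.toList ++ inpt.toList.filter (fun c => !pvOddD inpt.toList c) := by
  unfold sortings
  simp only [PySem.List.foldl_append_singleton_eq_self, List.nil_append]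
  rw [pv_A_loop inpt.toList]
  simp only []
  rw [pv_sorted_eq]
  rw [PySem.List.foldl_append_singleton_eq_map]
  rw [pv_foldl_str]
  simp only [String.toList_empty, List.nil_append, List.map_append, List.map_map]
  rw [List.flatten_append]
  have h1 : (List.map (String.toList ∘ PySem.Int.toStr ∘ pvToI) (pvJ inpt.toList)).flatten
      = pvJ inpt.toList := by
    rw [List.map_congr_left (g := fun d => [d])
      (fun d hd => by simp only [Function.comp_apply]; exact pv_toStr_toI (pv_mem_J_digit hd))]
    exact pv_flatten_singleton _
  have h2 : (List.map (String.toList ∘ fun c => String.ofList [c])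
        (List.filter (fun c => !pvOddD inpt.toList c) inpt.toList)).flatten
      = List.filter (fun c => !pvOddD inpt.toList c) inpt.toList := by
    rw [List.map_congr_left (g := fun c => [c]) (fun c _ => by simp)]
    exact pv_flatten_singleton _
  rw [h1, h2]

theorem pv_odd_fold (L : List Char) (ds : List Char) (s : String)
    (hds : ∀ d ∈ ds, '0' ≤ d ∧ d ≤ '9') :
    (ds.foldl (fun acc d =>
        if PySem.Int.mod ((PySem.Dict.counter L).getD d 0) 2 = 1 then
          acc ++ String.ofList (List.replicate ((PySem.Dict.counter L).getD d 0).toNat d)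
        else acc) s).toList
    = s.toList ++ ds.flatMap (fun d => if pvOddD L d then List.replicate (L.count d) d else []) := by
  induction ds generalizing s with
  | nil => simp
  | cons d ds ih =>
    rw [List.foldl_cons, List.flatMap_cons]
    have hd := hds d (by simp)
    have hcnt : (PySem.Dict.counter L).getD d 0 = (L.count d : Int) := PySem.Dict.getD_counter L d
    by_cases ho : (L.count d) % 2 == 1
    · rw [if_pos (by rw [hcnt]; exact (pv_mod1 _).mpr ho)]
      rw [ih _ (fun x hx => hds x (by simp [hx]))]
      have : pvOddD L d = true := by simp [pvOddD, hd, ho]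
      rw [this, if_pos rfl, hcnt]
      simp [Int.toNat_natCast]
    · rw [if_neg (by rw [hcnt]; exact fun hh => ho ((pv_mod1 _).mp hh))]
      rw [ih _ (fun x hx => hds x (by simp [hx]))]
      have hno : ¬ (L.count d) % 2 = 1 := by simpa using ho
      have : pvOddD L d = false := by simp [pvOddD, hno]
      rw [this]
      simp

set_option maxRecDepth 4096 in
theorem pv_B_toList (inpt : String) :
    (sortings_alt inpt).toList = pvJ inpt.toList ++ inpt.toList.filter (fun c => !pvOddD inpt.toList c) := by
  unfold sortings_alt
  simp only []
  rw [← PySem.Dict.counter_eq_foldl]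
  rw [String.toList_append]
  have hds : "0123456789".toList = ['0','1','2','3','4','5','6','7','8','9'] := by decide
  rw [hds, pv_odd_fold inpt.toList _ ""
    (by intro d hd; fin_cases hd <;> exact ⟨by decide, by decide⟩)]
  have hp : (fun ch => !(decide ('0' ≤ ch ∧ ch ≤ '9')) || (PySem.Int.mod ((PySem.Dict.counter inpt.toList).getD ch 0) 2 == 0))
      = (fun ch => !pvOddD inpt.toList ch) := by
    funext ch
    rw [PySem.Dict.getD_counter, pv_modb]
    by_cases hd : '0' ≤ ch ∧ ch ≤ '9' <;> simp [pvOddD, hd]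
  rw [hp]
  simp [pvJ]

-- ===== VERDICT (by name: the statement is the Claim_ definition above) =====
theorem sortings_spec : Claim_equal_sortings := by
  intro inpt _
  unfold Spec_sortings
  exact String.toList_injective ((pv_A_toList inpt).trans (pv_B_toList inpt).symm)
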